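-- pv_equiv track=rewrite | github.com/Pochitam/labs_algorithms | lab1/algorithms.py | exp_search
-- ===== SOURCE A (Python) =====
-- def exp_search(arr1, arr2):
--     p = 0
--     if len(arr1)>len(arr2):
--         arr1, arr2 = arr2, arr1
--     n, m =  len(arr1), len(arr2)
--     for el in arr1:
--         k = 1
--         if p>=m: break
--         if el==arr2[p]: return True
--         elif el<arr2[p]: continue
--         else:
--             l = p
--             while p!=(m-1) and arr2[p]<el:
--                 k *= 2
--                 p = min(p+k, m-1)
--             r = p
--             if bin_search(el, arr2, l, r): return True
--             p = l
--     return False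
--
-- def bin_search(el, arr, l, r):
--     while l<=r:
--         mid = (l+r)//2
--         if arr[mid] == el:
--             return True
--         elif arr[mid]>el:
--             r = mid-1
--         else:
--             l = mid+1
--     return False
-- ===== SOURCE B (Python) =====
-- def exp_search(arr1, arr2):
--     small, big = (arr2, arr1) if len(arr1) > len(arr2) else (arr1, arr2)
--     if not big:
--         return False
--     m = len(big)
--     first = big[0]
--     # probe checkpoints 2, 6, 14, ... capped at m-1: they do not depend on the
--     # element searched for, so build them once instead of re-doubling per element
--     cps = []
--     c, step = 0, 2
--     while c != m - 1:
--         c = min(c + step, m - 1)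
--         step += step
--         cps.append(c)
--
--     def probe_end(el):
--         for c in cps:
--             if c == m - 1 or big[c] >= el:
--                 return c
--         return 0
--
--     def contains(el, lo, hi):
--         if lo > hi:
--             return False
--         mid = (lo + hi) // 2
--         v = big[mid]
--         if v == el:
--             return True
--         if v > el:
--             return contains(el, lo, mid - 1)
--         return contains(el, mid + 1, hi)
--
--     def hit(el):
--         if el == first:
--             return True
--         if el < first:
--             return False
--         return contains(el, 0, probe_end(el))
--
--     return any(hit(el) for el in set(small))
-- ===== Notes on version B (the rewrite author's own statement) =====
-- stated objective: alternative
-- what changed: B hoists the element-independent exponential-probe checkpoints out of the per-element loop (built once per call as a list), iterates over the deduplicated set of the shorter array's elements (order is irrelevant since the result is a disjunction), and replaces the iterative binary search with pointer bookkeeping by a recursive containment search.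
import Mathlib
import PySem

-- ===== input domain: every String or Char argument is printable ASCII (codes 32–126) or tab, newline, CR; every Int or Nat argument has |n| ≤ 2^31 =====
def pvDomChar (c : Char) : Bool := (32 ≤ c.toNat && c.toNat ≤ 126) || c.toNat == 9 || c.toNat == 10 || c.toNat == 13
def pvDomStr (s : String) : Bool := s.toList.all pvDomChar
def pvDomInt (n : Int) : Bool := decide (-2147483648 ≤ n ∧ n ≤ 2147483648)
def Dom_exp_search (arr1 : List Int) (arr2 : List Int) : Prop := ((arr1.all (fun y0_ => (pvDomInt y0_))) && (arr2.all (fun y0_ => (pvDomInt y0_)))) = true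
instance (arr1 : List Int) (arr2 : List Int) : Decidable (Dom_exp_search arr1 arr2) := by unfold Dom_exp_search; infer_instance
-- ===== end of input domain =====

-- B restructures A: the probe checkpoints (which do not depend on the element searched for)
-- are built once per call instead of re-doubled per element, the shorter array is iterated
-- as a deduplicated set, and the binary search is recursive; equal to A on all inputs.

-- ===== PORT A =====

-- literal transliteration of bin_search: while l <= r: mid = (l+r)//2; ...
def bin_search (el : Int) (arr : List Int) (l : Int) (r : Int) : Bool :=
  if l ≤ r then
    let mid := PySem.Int.floordiv (l + r) 2
    match PySem.List.pyGet? arr mid with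
    | none => false   -- arr[mid]: IndexError in Python; unreachable from exp_search's calls
    | some v =>
      if v = el then true
      else if v > el then bin_search el arr l (mid - 1)
      else bin_search el arr (mid + 1) r
  else false
termination_by (r + 1 - l).toNat
decreasing_by
  all_goals
    have hm := PySem.Int.floordiv_two_mid_bounds (lo := l) (hi := r) (by omega)
    omega

-- the inner 'while p != (m-1) and arr2[p] < el' loop; the fuel only makes it total
-- (on A's calls p strictly increases towards m-1, so fuel m.toNat + 1 is never exhausted)
def expWhile (arr2 : List Int) (m : Int) (el : Int) : Nat → Int → Int → Int
  | 0, p, _ => p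
  | fuel + 1, p, k =>
    if p ≠ m - 1 then
      match PySem.List.pyGet? arr2 p with
      | none => p   -- arr2[p]: IndexError in Python; unreachable from exp_search's calls
      | some v =>
        if v < el then expWhile arr2 m el fuel (min (p + 2 * k) (m - 1)) (2 * k)
        else p
    else p

-- the 'for el in arr1' loop with its running pointer p
def expLoop (arr2 : List Int) (m : Int) : List Int → Int → Bool
  | [], _ => false
  | el :: rest, p =>
    if p ≥ m then false          -- 'if p>=m: break' then 'return False'
    else match PySem.List.pyGet? arr2 p with
      | none => false            -- arr2[p]: IndexError in Python; unreachable (0 ≤ p < m)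
      | some v =>
        if el = v then true
        else if el < v then expLoop arr2 m rest p
        else
          let l := p
          let r := expWhile arr2 m el (m.toNat + 1) p 1
          if bin_search el arr2 l r then true
          else expLoop arr2 m rest l    -- 'p = l'

def exp_search (arr1 : List Int) (arr2 : List Int) : Bool :=
  let pq := if arr1.length > arr2.length then (arr2, arr1) else (arr1, arr2)
  expLoop pq.2 (pq.2.length : Int) pq.1 0

-- ===== PORT B =====

-- def contains(el, lo, hi): recursive binary containment search on big[lo..hi]
def alt_contains (big : List Int) (el : Int) (lo : Int) (hi : Int) : Bool :=
  if lo > hi then false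
  else
    let mid := PySem.Int.floordiv (lo + hi) 2
    match PySem.List.pyGet? big mid with
    | none => false   -- big[mid]: IndexError in Python; unreachable from exp_search_alt's calls
    | some v =>
      if v = el then true
      else if v > el then alt_contains big el lo (mid - 1)
      else alt_contains big el (mid + 1) hi
termination_by (hi + 1 - lo).toNat
decreasing_by
  all_goals
    have hm := PySem.Int.floordiv_two_mid_bounds (lo := lo) (hi := hi) (by omega)
    omega

-- the 'while c != m - 1: c = min(c + step, m - 1); step += step; cps.append(c)' loop;
-- the fuel only makes it total (c strictly increases towards m-1, so m.toNat + 1 suffices)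
def alt_cps (m : Int) : Nat → Int → Int → List Int
  | 0, _, _ => []
  | fuel + 1, c, step =>
    if c ≠ m - 1 then
      let c' := min (c + step) (m - 1)
      c' :: alt_cps m fuel c' (step + step)
    else []

-- def probe_end(el): first checkpoint c with c == m-1 or big[c] >= el, else 0
def alt_probe_end (big : List Int) (m : Int) (el : Int) : List Int → Int
  | [] => 0
  | c :: rest =>
    if c = m - 1 then c
    else match PySem.List.pyGet? big c with
      | none => 0   -- big[c]: IndexError in Python; unreachable from exp_search_alt's calls
      | some v => if v ≥ el then c else alt_probe_end big m el rest

-- def hit(el)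
def alt_hit (big : List Int) (m : Int) (first : Int) (cps : List Int) (el : Int) : Bool :=
  if el = first then true
  else if el < first then false
  else alt_contains big el 0 (alt_probe_end big m el cps)

def exp_search_alt (arr1 : List Int) (arr2 : List Int) : Bool :=
  let sb := if arr1.length > arr2.length then (arr2, arr1) else (arr1, arr2)
  match sb.2 with
  | [] => false                  -- 'if not big: return False'
  | b0 :: brest =>
    let big := b0 :: brest
    let m : Int := (big.length : Int)
    let cps := alt_cps m (m.toNat + 1) 0 2
    (PySem.Set.ofList sb.1).any (alt_hit big m b0 cps)   -- any(hit(el) for el in set(small))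

-- ===== PRECONDITION & SPEC =====

def Spec_exp_search (arr1 : List Int) (arr2 : List Int) (out : Bool) : Prop := out = exp_search_alt arr1 arr2
instance (arr1 : List Int) (arr2 : List Int) (out : Bool) : Decidable (Spec_exp_search arr1 arr2 out) := by unfold Spec_exp_search; infer_instance

-- ===== CLAIM (what is proved, stated in full; the proofs are below) =====
def Claim_equal_exp_search : Prop := ∀ (arr1 : List Int) (arr2 : List Int), Dom_exp_search arr1 arr2 → Spec_exp_search arr1 arr2 (exp_search arr1 arr2)

-- ===== LEMMAS AND PROOFS =====

-- A's per-element outcome when its pointer p is 0 (p is reset to 0 after every element)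
def hitA (big : List Int) (m : Int) (el : Int) : Bool :=
  if (0 : Int) ≥ m then false
  else match PySem.List.pyGet? big 0 with
    | none => false
    | some v =>
      if el = v then true
      else if el < v then false
      else bin_search el big 0 (expWhile big m el (m.toNat + 1) 0 1)

-- the two binary searches take the same walk on every input
theorem bs_eq (el : Int) (arr : List Int) :
    ∀ (N : Nat) (l r : Int), (r + 1 - l).toNat ≤ N →
      bin_search el arr l r = alt_contains arr el l r := by
  intro N
  induction N with
  | zero =>
    intro l r hN
    rw [bin_search, alt_contains, if_neg (by omega : ¬ l ≤ r), if_pos (by omega : l > r)]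
  | succ N ih =>
    intro l r hN
    by_cases hlr : l ≤ r
    · have hmid := PySem.Int.floordiv_two_mid_bounds (lo := l) (hi := r) hlr
      rw [bin_search, alt_contains, if_pos hlr, if_neg (by omega : ¬ l > r)]
      cases hg : PySem.List.pyGet? arr (PySem.Int.floordiv (l + r) 2) with
      | none => simp only [hg]
      | some v =>
        simp only [hg]
        by_cases hve : v = el
        · rw [if_pos hve, if_pos hve]
        · rw [if_neg hve, if_neg hve]
          by_cases hvg : v > el
          · rw [if_pos hvg, if_pos hvg]
            exact ih l (PySem.Int.floordiv (l + r) 2 - 1) (by omega)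
          · rw [if_neg hvg, if_neg hvg]
            exact ih (PySem.Int.floordiv (l + r) 2 + 1) r (by omega)
    · rw [bin_search, alt_contains, if_neg hlr, if_pos (by omega : l > r)]

-- once A's while pointer reaches m-1 it stops there
theorem expWhile_last (big : List Int) (m el : Int) :
    ∀ (fuel : Nat) (k : Int), expWhile big m el fuel (m - 1) k = m - 1 := by
  intro fuel k
  cases fuel with
  | zero => rw [expWhile]
  | succ fuel => rw [expWhile, if_neg (by omega : ¬ (m - 1 ≠ m - 1))]

-- A's doubling probe from a passed position equals B's scan of the remaining checkpoints
theorem probe_eq (big : List Int) (m el : Int) (hm : (big.length : Int) = m) :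
    ∀ (fuel : Nat) (c k : Int), 1 ≤ k → 0 ≤ c → c < m - 1 → (m - 1 - c).toNat ≤ fuel →
      (∃ v, PySem.List.pyGet? big c = some v ∧ v < el) →
      expWhile big m el fuel c k = alt_probe_end big m el (alt_cps m fuel c (k + k)) := by
  intro fuel
  induction fuel with
  | zero => intro c k hk hc0 hcm hf hv; omega
  | succ fuel ih =>
    intro c k hk hc0 hcm hf hv
    obtain ⟨v, hg, hvel⟩ := hv
    rw [expWhile, if_pos (by omega : c ≠ m - 1)]
    simp only [hg, if_pos hvel]
    rw [alt_cps, if_pos (by omega : c ≠ m - 1)]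
    simp only []
    rw [alt_probe_end]
    have h2k : c + (k + k) = c + 2 * k := by ring
    rw [h2k]
    by_cases hend : min (c + 2 * k) (m - 1) = m - 1
    · rw [if_pos hend, hend, expWhile_last]
    · rw [if_neg hend]
      have hc' : min (c + 2 * k) (m - 1) = c + 2 * k := by omega
      have hlt : c + 2 * k < m - 1 := by omega
      have hget' : PySem.List.pyGet? big (c + 2 * k)
          = some (big[(c + 2 * k).toNat]'(by omega)) :=
        PySem.List.pyGet?_eq_some_getElem (xs := big) (i := c + 2 * k) (by omega) (by omega)
      rw [hc']
      simp only [hget']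
      by_cases hge : big[(c + 2 * k).toNat]'(by omega) ≥ el
      · rw [if_pos hge]
        have hfu : 2 ≤ fuel := by omega
        obtain ⟨fuel', rfl⟩ : ∃ f, fuel = f + 1 := ⟨fuel - 1, by omega⟩
        rw [expWhile, if_pos (by omega : c + 2 * k ≠ m - 1)]
        simp only [hget']
        rw [if_neg (by omega : ¬ big[(c + 2 * k).toNat]'(by omega) < el)]
      · rw [if_neg hge]
        have hrec := ih (c + 2 * k) (2 * k) (by omega) (by omega) (by omega) (by omega)
          ⟨big[(c + 2 * k).toNat]'(by omega), hget', by omega⟩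
        have e2 : k + k + (k + k) = 2 * k + 2 * k := by ring
        rw [e2]
        exact hrec

-- the whole probe + binary search of A equals B's hit on every element (nonempty big)
theorem hitA_eq_alt_hit (b0 : Int) (brest : List Int) (el : Int) :
    hitA (b0 :: brest) ((b0 :: brest).length : Int) el
      = alt_hit (b0 :: brest) ((b0 :: brest).length : Int) b0
          (alt_cps ((b0 :: brest).length : Int) (((b0 :: brest).length : Int).toNat + 1) 0 2) el := by
  set big := b0 :: brest with hbig
  set m : Int := (big.length : Int) with hmdef
  have hm1 : 1 ≤ m := by simp [hmdef, hbig]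
  unfold hitA alt_hit
  rw [if_neg (by omega : ¬ (0 : Int) ≥ m)]
  have hg0 : PySem.List.pyGet? big 0 = some b0 := by
    rw [hbig]; exact PySem.List.pyGet?_zero_cons b0 brest
  simp only [hg0]
  by_cases he : el = b0
  · rw [if_pos he, if_pos he]
  · rw [if_neg he, if_neg he]
    by_cases hlt : el < b0
    · rw [if_pos hlt, if_pos hlt]
    · rw [if_neg hlt, if_neg hlt]
      have hprobe : expWhile big m el (m.toNat + 1) 0 1
          = alt_probe_end big m el (alt_cps m (m.toNat + 1) 0 2) := by
        by_cases hm2 : m = 1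
        · have h0 : (0 : Int) = m - 1 := by omega
          rw [h0, expWhile_last, alt_cps, if_neg (by simp : ¬ (m - 1 ≠ m - 1)),
            alt_probe_end]
          omega
        · have hp := probe_eq big m el (by rw [hmdef]) (m.toNat + 1) 0 1
            (by omega) (by omega) (by omega) (by omega) ⟨b0, hg0, by omega⟩
          have e1 : (1 : Int) + 1 = 2 := by norm_num
          rw [hp, e1]
      rw [hprobe]
      exact bs_eq el big _ 0 _ le_rfl

-- A's loop with pointer 0 is the disjunction of per-element outcomes
theorem expLoop_any (big : List Int) (m : Int) :
    ∀ (a : List Int), expLoop big m a 0 = a.any (hitA big m) := by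
  intro a
  induction a with
  | nil => rw [expLoop]; simp
  | cons el rest ih =>
    rw [expLoop, List.any_cons]
    by_cases h0 : (0 : Int) ≥ m
    · rw [if_pos h0]
      have hall : ∀ x, hitA big m x = false := by
        intro x; unfold hitA; rw [if_pos h0]
      rw [hall el, List.any_eq_false.mpr (fun x _ => by simp [hall x])]
      simp
    · rw [if_neg h0]
      cases hg : PySem.List.pyGet? big 0 with
      | none =>
        have hall : ∀ x, hitA big m x = false := by
          intro x; unfold hitA; rw [if_neg h0, hg]
        rw [hall el, List.any_eq_false.mpr (fun x _ => by simp [hall x])]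
        simp
      | some v =>
        simp only []
        have hel : hitA big m el = (if el = v then true else if el < v then false
            else bin_search el big 0 (expWhile big m el (m.toNat + 1) 0 1)) := by
          unfold hitA; rw [if_neg h0]; simp only [hg]
        rw [hel]
        by_cases he : el = v
        · rw [if_pos he, if_pos he]; simp
        · rw [if_neg he, if_neg he]
          by_cases hlt : el < v
          · rw [if_pos hlt, if_pos hlt, ih]; simp
          · rw [if_neg hlt, if_neg hlt]
            by_cases hb : bin_search el big 0 (expWhile big m el (m.toNat + 1) 0 1) = true
            · rw [if_pos hb, hb]; simp
            · have hb' : bin_search el big 0 (expWhile big m el (m.toNat + 1) 0 1) = false :=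
                Bool.not_eq_true _ ▸ hb
              rw [if_neg hb, hb', ih]
              simp

-- any over set(l) equals any over l (membership is all that matters)
theorem any_ofList (l : List Int) (f : Int → Bool) :
    (PySem.Set.ofList l).any f = l.any f := by
  rw [Bool.eq_iff_iff]
  simp only [List.any_eq_true]
  constructor
  · rintro ⟨x, hx, hf⟩
    exact ⟨x, by rw [PySem.Set.mem_ofList] at hx; exact hx, hf⟩
  · rintro ⟨x, hx, hf⟩
    exact ⟨x, by rw [PySem.Set.mem_ofList]; exact hx, hf⟩

-- the core equality, stated for the selected (small, big) pair
theorem key_eq (small big : List Int) :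
    expLoop big (big.length : Int) small 0 =
      (match big with
       | [] => false
       | b0 :: brest =>
         (PySem.Set.ofList small).any
           (alt_hit (b0 :: brest) ((b0 :: brest).length : Int) b0
             (alt_cps ((b0 :: brest).length : Int) (((b0 :: brest).length : Int).toNat + 1) 0 2))) := by
  cases big with
  | nil =>
    rw [expLoop_any]
    rw [List.any_eq_false.mpr (fun x _ => by simp [hitA])]
  | cons b0 brest =>
    show expLoop (b0 :: brest) ((b0 :: brest).length : Int) small 0 =
      (PySem.Set.ofList small).any
        (alt_hit (b0 :: brest) ((b0 :: brest).length : Int) b0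
          (alt_cps ((b0 :: brest).length : Int) (((b0 :: brest).length : Int).toNat + 1) 0 2))
    rw [expLoop_any, any_ofList]
    congr 1
    funext x
    exact hitA_eq_alt_hit b0 brest x

theorem exp_search_eq (arr1 arr2 : List Int) :
    exp_search arr1 arr2 = exp_search_alt arr1 arr2 := by
  unfold exp_search exp_search_alt
  by_cases hl : arr1.length > arr2.length
  · rw [if_pos hl]
    exact key_eq arr2 arr1
  · rw [if_neg hl]
    exact key_eq arr1 arr2

-- ===== VERDICT (by name: the statement is the Claim_ definition above) =====
theorem exp_search_spec : Claim_equal_exp_search := by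
  intro arr1 arr2 _hdom
  unfold Spec_exp_search
  exact exp_search_eq arr1 arr2
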